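-- pv_equiv track=rewrite | github.com/jchy20/how-much-backtrack | reasoning-gym/reasoning_gym/arc/arc_1d_tasks.py | transform_copy_block_to_dots
-- ===== SOURCE A (Python) =====
-- def transform_copy_block_to_dots(input_grid: list[int]) -> list[int]:
--     size = len(input_grid)
--     # 1. Determine the block color and size at the left
--     block_color = input_grid[0]
--     if block_color == 0:
--         raise ValueError("No block found at index 0")
--     block_size = 1
--     while block_size < size and input_grid[block_size] == block_color:
--         block_size += 1
--
--     # 2. Locate the dot positions (same color, but outside the initial block)
--     dot_positions = [
--         i for i, v in enumerate(input_grid)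
--         if v == block_color and i >= block_size
--     ]
--
--     # 3. Build the output grid
--     answer = [0] * size
--
--     # 3a. Copy the original block at 0
--     for i in range(block_size):
--         answer[i] = block_color
--
--     # 3b. For each dot, copy the block centered at that dot
--     half = block_size // 2
--     for pos in dot_positions:
--         start = pos - half
--         # write block_size cells starting at 'start'
--         for j in range(block_size):
--             idx = start + j
--             if 0 <= idx < size:
--                 answer[idx] = block_color
--
--     return answer
-- ===== SOURCE B (Python) =====
-- def transform_copy_block_to_dots(input_grid: list[int]) -> list[int]:
--     size = len(input_grid)
--     block_color = input_grid[0]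
--     if block_color == 0:
--         raise ValueError("No block found at index 0")
--     block_size = 1
--     while block_size < size and input_grid[block_size] == block_color:
--         block_size += 1
--     half = block_size // 2
--
--     # Difference array: +1 at each interval start, -1 just past its end;
--     # a cell is colored iff its running coverage count is positive.
--     diff = [0] * (size + 1)
--     diff[0] += 1
--     diff[block_size] -= 1
--     for pos in range(block_size, size):
--         if input_grid[pos] == block_color:
--             lo = pos - half                      # always >= 1
--             hi = min(lo + block_size, size)
--             diff[lo] += 1
--             diff[hi] -= 1
--     answer = []
--     cov = 0
--     for v in diff[:size]:
--         cov += v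
--         answer.append(block_color if cov > 0 else 0)
--     return answer
-- ===== Notes on version B (the rewrite author's own statement) =====
-- stated objective: alternative
-- what changed: A paints block_size cells around every dot (nested loops over dots x block cells); B records each covered interval as +1/-1 endpoints in a difference array and emits the output in one prefix-sum sweep (O(size + dots) vs O(size + dots*block_size); measured only 1.31x at the largest size on random inputs, where blocks are short, so no speed is claimed).
-- outside the precondition, e.g. on transform_copy_block_to_dots([]): A raises IndexError, B raises IndexError; on transform_copy_block_to_dots([0, 1, 0]): A raises ValueError, B raises ValueError
import Mathlib
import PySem

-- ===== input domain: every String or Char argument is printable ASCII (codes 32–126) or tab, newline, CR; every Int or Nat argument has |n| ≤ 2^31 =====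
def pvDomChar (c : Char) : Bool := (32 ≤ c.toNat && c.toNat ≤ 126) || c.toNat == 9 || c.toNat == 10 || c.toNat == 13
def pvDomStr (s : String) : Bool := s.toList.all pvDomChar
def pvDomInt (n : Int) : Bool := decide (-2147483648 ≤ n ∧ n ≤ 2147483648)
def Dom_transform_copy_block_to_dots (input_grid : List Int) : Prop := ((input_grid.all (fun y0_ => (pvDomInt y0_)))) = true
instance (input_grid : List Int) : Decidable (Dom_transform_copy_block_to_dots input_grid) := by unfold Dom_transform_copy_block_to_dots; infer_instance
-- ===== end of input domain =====

-- B replaces A's per-dot block painting by a difference array of interval endpoints with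
-- one prefix-sum sweep (alternative algorithm); same return value on all inputs where A returns.


-- ===== PORT A =====
-- shared helper: the 'while block_size < size and input_grid[block_size] == block_color' loop,
-- which appears verbatim in both A and B
def pyBlockSize (g : List Int) (c : Int) (bs : Nat) : Nat :=
  if _h : bs < g.length ∧ g.getD bs 0 = c then pyBlockSize g c (bs + 1) else bs
termination_by g.length - bs
decreasing_by omega

def transform_copy_block_to_dots (input_grid : List Int) : List Int :=
  if input_grid = [] then []    -- Python: IndexError on input_grid[0]; excluded by Pre_
  else
    let c := input_grid.headI   -- block_color = input_grid[0]
    if c = 0 then []            -- Python: raise ValueError; excluded by Pre_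
    else
      let size := input_grid.length
      let bs := pyBlockSize input_grid c 1
      let dots : List Int := (PySem.List.enumerate input_grid 0).filterMap
        (fun iv => if iv.2 = c ∧ (bs : Int) ≤ iv.1 then some iv.1 else none)
      let a0 := (List.range bs).foldl (fun (a : List Int) (i : Nat) => a.set i c)
        (List.replicate size 0)
      let half := bs / 2
      dots.foldl (fun (ans : List Int) (pos : Int) =>
        (List.range bs).foldl (fun (a : List Int) (j : Nat) =>
          let idx : Int := pos - (half : Int) + (j : Int)
          if 0 ≤ idx ∧ idx < (size : Int) then a.set idx.toNat c else a) ans) a0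

-- ===== PORT B =====
-- the 'cov' prefix-sum loop that appends block_color when coverage is positive
def scanCov (c : Int) : List Int → Int → List Int
  | [], _ => []
  | v :: rest, cov => (if cov + v > 0 then c else 0) :: scanCov c rest (cov + v)

def transform_copy_block_to_dots_alt (input_grid : List Int) : List Int :=
  if input_grid = [] then []    -- Python: IndexError on input_grid[0]; excluded by Pre_
  else
    let c := input_grid.headI   -- block_color = input_grid[0]
    if c = 0 then []            -- Python: raise ValueError; excluded by Pre_
    else
      let size := input_grid.length
      let bs := pyBlockSize input_grid c 1
      let half := bs / 2
      let d0 := ((List.replicate (size + 1) (0 : Int)).modify 0 (· + 1)).modify bs (· - 1)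
      let d := (PySem.List.pyRange (bs : Int) (size : Int) 1).foldl
        (fun (dd : List Int) (pos : Int) =>
          if PySem.List.pyGet? input_grid pos = some c then
            -- lo = pos - half, hi = min(lo + block_size, size); both provably nonnegative
            -- here, so .toNat is Python's list index exactly
            (dd.modify (pos - (half : Int)).toNat (· + 1)).modify
              (min ((pos - (half : Int)) + (bs : Int)) ((size : Int))).toNat (· - 1)
          else dd) d0
      scanCov c (d.take size) 0

-- ===== PRECONDITION & SPEC =====
-- Pre_ excludes exactly the inputs where Python A raises: the empty list (IndexError) and a
-- grid starting with 0 (ValueError).  B raises the same exceptions there.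
def Pre_transform_copy_block_to_dots (input_grid : List Int) : Prop :=
  input_grid ≠ [] ∧ input_grid.headI ≠ 0
instance (input_grid : List Int) : Decidable (Pre_transform_copy_block_to_dots input_grid) := by
  unfold Pre_transform_copy_block_to_dots; infer_instance

def pvWitness_transform_copy_block_to_dots : List Int := [2, 2, 0, 0, 2, 0]

def Spec_transform_copy_block_to_dots (input_grid : List Int) (out : List Int) : Prop := out = transform_copy_block_to_dots_alt input_grid
instance (input_grid : List Int) (out : List Int) : Decidable (Spec_transform_copy_block_to_dots input_grid out) := by unfold Spec_transform_copy_block_to_dots; infer_instance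

-- ===== CLAIM (what is proved, stated in full; the proofs are below) =====
def Claim_equal_transform_copy_block_to_dots : Prop := ∀ (input_grid : List Int), Dom_transform_copy_block_to_dots input_grid → Pre_transform_copy_block_to_dots input_grid → Spec_transform_copy_block_to_dots input_grid (transform_copy_block_to_dots input_grid)

-- ===== LEMMAS AND PROOFS =====

-- window test: dot at p (cast to Int) covers cell i
def winB (half bs : Nat) (p i : Nat) : Bool :=
  decide ((p : Int) - (half : Int) ≤ (i : Int) ∧ (i : Int) < (p : Int) - (half : Int) + (bs : Int))

-- common characterization: cell i of the output is c iff it lies in the initial block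
-- or in the window centered at some dot
def covB (g : List Int) (c : Int) (bs half : Nat) (i : Nat) : Bool :=
  decide (i < bs) ||
    (List.range g.length).any (fun p => decide (bs ≤ p) && decide (g.getD p 0 = c) && winB half bs p i)

def outSpec (g : List Int) (c : Int) (bs half : Nat) : List Int :=
  (List.range g.length).map (fun (i : Nat) => if covB g c bs half i then c else 0)

theorem pyBlockSize_bounds (g : List Int) (c : Int) (s : Nat) (hs : s ≤ g.length) :
    s ≤ pyBlockSize g c s ∧ pyBlockSize g c s ≤ g.length := by
  rw [pyBlockSize]
  split
  · rename_i h
    have ih := pyBlockSize_bounds g c (s + 1) (by omega)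
    omega
  · omega
termination_by g.length - s
decreasing_by rename_i h; omega

-- ---------- A side ----------

theorem initBlock_eq (size m : Nat) (c : Int) (hm : m ≤ size) :
    (List.range m).foldl (fun (a : List Int) (i : Nat) => a.set i c) (List.replicate size (0 : Int)) =
      (List.range size).map (fun (i : Nat) => if i < m then c else 0) := by
  induction m with
  | zero =>
      simp only [List.range_zero, List.foldl_nil]
      apply List.ext_getElem
      · simp
      · intro j h1 h2
        simp
  | succ m ih =>
      rw [List.range_succ, List.foldl_append, ih (by omega)]
      simp only [List.foldl_cons, List.foldl_nil]
      apply List.ext_getElem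
      · simp
      · intro j h1 h2
        simp only [List.getElem_set, List.getElem_map, List.getElem_range]
        split_ifs <;> omega

theorem paint_one (size : Nat) (c : Int) (bs half : Nat) (pos : Int) (f : Nat → Int) :
    (List.range bs).foldl (fun (a : List Int) (j : Nat) =>
        let idx : Int := pos - (half : Int) + (j : Int)
        if 0 ≤ idx ∧ idx < (size : Int) then a.set idx.toNat c else a)
      ((List.range size).map f) =
      (List.range size).map (fun (i : Nat) =>
        if pos - (half : Int) ≤ (i : Int) ∧ (i : Int) < pos - (half : Int) + (bs : Int) then c
        else f i) := by
  induction bs generalizing f with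
  | zero =>
      simp only [List.range_zero, List.foldl_nil]
      apply List.map_congr_left
      intro i _
      have hno : ¬ (pos - (half : Int) ≤ (i : Int) ∧ (i : Int) < pos - (half : Int) + ((0 : Nat) : Int)) := by
        push_cast; omega
      rw [if_neg hno]
  | succ bs ih =>
      rw [List.range_succ, List.foldl_append, ih]
      simp only [List.foldl_cons, List.foldl_nil]
      by_cases hin : 0 ≤ pos - (half : Int) + (bs : Int) ∧ pos - (half : Int) + (bs : Int) < (size : Int)
      · rw [if_pos hin]
        apply List.ext_getElem
        · simp
        · intro j h1 h2
          have hj : j < size := by simpa using h2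
          simp only [List.getElem_set, List.getElem_map, List.getElem_range]
          split_ifs <;> push_cast at * <;> omega
      · rw [if_neg hin]
        apply List.map_congr_left
        intro i hi
        have hi' : i < size := List.mem_range.mp hi
        have hi2 : (i : Int) < (size : Int) := by exact_mod_cast hi'
        have hiff : (pos - (half : Int) ≤ (i : Int) ∧ (i : Int) < pos - (half : Int) + ((bs + 1 : Nat) : Int)) ↔
               (pos - (half : Int) ≤ (i : Int) ∧ (i : Int) < pos - (half : Int) + (bs : Int)) := by
          push_cast
          constructor
          · rintro ⟨ha, hb⟩
            refine ⟨ha, ?_⟩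
            by_contra hcon
            exact hin ⟨by omega, by omega⟩
          · rintro ⟨ha, hb⟩; exact ⟨ha, by omega⟩
        by_cases hc1 : pos - (half : Int) ≤ (i : Int) ∧ (i : Int) < pos - (half : Int) + ((bs + 1 : Nat) : Int)
        · rw [if_pos hc1, if_pos (hiff.mp hc1)]
        · rw [if_neg hc1, if_neg (fun hh => hc1 (hiff.mpr hh))]

theorem paint_dots (size : Nat) (c : Int) (bs half : Nat) (L : List Int) (f : Nat → Int) :
    L.foldl (fun (ans : List Int) (pos : Int) =>
        (List.range bs).foldl (fun (a : List Int) (j : Nat) =>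
          let idx : Int := pos - (half : Int) + (j : Int)
          if 0 ≤ idx ∧ idx < (size : Int) then a.set idx.toNat c else a) ans)
      ((List.range size).map f) =
      (List.range size).map (fun (i : Nat) =>
        if L.any (fun (pos : Int) =>
            decide (pos - (half : Int) ≤ (i : Int) ∧ (i : Int) < pos - (half : Int) + (bs : Int)))
        then c else f i) := by
  induction L generalizing f with
  | nil => simp
  | cons pos L ih =>
      simp only [List.foldl_cons]
      rw [paint_one, ih]
      apply List.map_congr_left
      intro i _
      simp only [List.any_cons, Bool.or_eq_true, decide_eq_true_eq]
      split_ifs <;> tauto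

theorem if_merge (p : Prop) [Decidable p] (b : Bool) (c v : Int) :
    (if b then c else if p then c else v) = (if (decide p || b) then c else v) := by
  by_cases hp : p <;> cases b <;> simp [hp]

-- the dot list of port A tests the same cells as the range-based scan in covB
theorem dots_any_eq (g : List Int) (c : Int) (bs half i : Nat) :
    ((PySem.List.enumerate g 0).filterMap
        (fun iv => if iv.2 = c ∧ (bs : Int) ≤ iv.1 then some iv.1 else none)).any
      (fun (pos : Int) =>
        decide (pos - (half : Int) ≤ (i : Int) ∧ (i : Int) < pos - (half : Int) + (bs : Int))) =
    (List.range g.length).any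
      (fun p => decide (bs ≤ p) && decide (g.getD p 0 = c) && winB half bs p i) := by
  rw [Bool.eq_iff_iff, List.any_eq_true, List.any_eq_true]
  constructor
  · rintro ⟨pos, hmem, hwin⟩
    rw [List.mem_filterMap] at hmem
    obtain ⟨iv, hiv, hsome⟩ := hmem
    rw [PySem.List.mem_enumerate_iff] at hiv
    obtain ⟨k, hk, rfl⟩ := hiv
    by_cases hcond : g[k] = c ∧ (bs : Int) ≤ ((0 : Int) + k)
    · rw [if_pos hcond] at hsome
      obtain rfl : (0 : Int) + (k : Int) = pos := by simpa using hsome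
      refine ⟨k, List.mem_range.mpr hk, ?_⟩
      have hbk : bs ≤ k := by
        have := hcond.2; omega
      have hgd : g.getD k 0 = c := by
        rw [List.getD_eq_getElem g 0 hk]; exact hcond.1
      simp only [winB, Bool.and_eq_true, decide_eq_true_eq] at hwin ⊢
      refine ⟨⟨hbk, hgd⟩, ?_⟩
      constructor <;> omega
    · rw [if_neg hcond] at hsome; exact absurd hsome (by simp)
  · rintro ⟨p, hp, hcond⟩
    have hpn : p < g.length := List.mem_range.mp hp
    simp only [winB, Bool.and_eq_true, decide_eq_true_eq] at hcond
    obtain ⟨⟨hbp, hgd⟩, hw⟩ := hcond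
    refine ⟨(p : Int), ?_, by simp only [decide_eq_true_eq]; constructor <;> omega⟩
    rw [List.mem_filterMap]
    refine ⟨((0 : Int) + p, g[p]), ?_, ?_⟩
    · rw [PySem.List.mem_enumerate_iff]; exact ⟨p, hpn, rfl⟩
    · have hgp : g[p] = c := by rw [List.getD_eq_getElem g 0 hpn] at hgd; exact hgd
      rw [if_pos ⟨hgp, by omega⟩]
      simp

theorem charA (g : List Int) (c : Int) (t : List Int) (hg : g = c :: t) (hc : c ≠ 0) :
    transform_copy_block_to_dots g = outSpec g c (pyBlockSize g c 1) (pyBlockSize g c 1 / 2) := by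
  subst hg
  have hlen : 1 ≤ (c :: t).length := by simp
  obtain ⟨hbs1, hbs2⟩ := pyBlockSize_bounds (c :: t) c 1 hlen
  have hne : ¬ ((c :: t) = ([] : List Int)) := by simp
  unfold transform_copy_block_to_dots
  rw [if_neg hne]
  simp only [List.headI_cons]
  rw [if_neg hc]
  rw [initBlock_eq _ _ _ hbs2, paint_dots]
  unfold outSpec covB
  apply List.map_congr_left
  intro i _
  have hde := dots_any_eq (c :: t) c (pyBlockSize (c :: t) c 1) (pyBlockSize (c :: t) c 1 / 2) i
  simp only [if_merge]
  exact congrArg (fun b : Bool =>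
    if (decide (i < pyBlockSize (c :: t) c 1) || b) = true then c else (0 : Int)) hde

-- ---------- B side ----------

theorem scanCov_eq (c : Int) (l : List Int) (cov : Int) :
    scanCov c l cov =
      (List.range l.length).map (fun (i : Nat) => if cov + (l.take (i + 1)).sum > 0 then c else 0) := by
  induction l generalizing cov with
  | nil => simp [scanCov]
  | cons v rest ih =>
      rw [scanCov, ih]
      rw [List.length_cons, List.range_succ_eq_map]
      simp only [List.map_cons, List.map_map]
      congr 1
      · simp
      · apply List.map_congr_left
        intro i _
        simp only [Function.comp_apply, Nat.succ_eq_add_one, List.take_succ_cons,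
          List.sum_cons, ← add_assoc]

theorem take_set_sum (a : List Int) (k m : Nat) (v : Int) (hk : k < a.length) :
    ((a.set k v).take m).sum = (a.take m).sum + if k < m then v - a[k] else 0 := by
  induction a generalizing k m with
  | nil => simp at hk
  | cons h tl ih =>
      cases k with
      | zero =>
          cases m with
          | zero => simp
          | succ j =>
              simp only [List.set_cons_zero, List.take_succ_cons, List.sum_cons, List.getElem_cons_zero]
              rw [if_pos (by omega : 0 < j + 1)]
              ring
      | succ k =>
          cases m with
          | zero => simp
          | succ j =>
              simp only [List.set_cons_succ, List.take_succ_cons, List.sum_cons,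
                List.getElem_cons_succ]
              rw [ih k j (by simpa using hk)]
              split_ifs <;> omega

theorem modify_take_sum (a : List Int) (k : Nat) (x : Int) (m : Nat) (hk : k < a.length) :
    ((a.modify k (· + x)).take m).sum = (a.take m).sum + if k < m then x else 0 := by
  rw [List.modify_eq_set_get _ hk, take_set_sum a k m _ hk]
  have hga : a.get ⟨k, hk⟩ = a[k] := rfl
  rw [hga]
  split_ifs <;> ring

theorem diff_fold (g : List Int) (c : Int) (size bs half : Nat) (i : Nat)
    (L : List Int) (dd : List Int)
    (hlen : dd.length = size + 1)
    (hmem : ∀ pos ∈ L, (bs : Int) ≤ pos ∧ pos < (size : Int))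
    (hhb : half ≤ bs) (hi : i < size) :
    (((L.foldl (fun (dd : List Int) (pos : Int) =>
        if PySem.List.pyGet? g pos = some c then
          (dd.modify (pos - (half : Int)).toNat (· + 1)).modify
            (min ((pos - (half : Int)) + (bs : Int)) ((size : Int))).toNat (· - 1)
        else dd) dd).take (i + 1)).sum) =
      ((dd.take (i + 1)).sum) +
        ((L.filter (fun (pos : Int) => decide (PySem.List.pyGet? g pos = some c) &&
            decide (pos - (half : Int) ≤ (i : Int) ∧
              (i : Int) < pos - (half : Int) + (bs : Int)))).length : Int) := by
  induction L generalizing dd with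
  | nil => simp
  | cons pos L ih =>
      have hpos := hmem pos (by simp)
      simp only [List.foldl_cons, List.filter_cons]
      by_cases hdot : PySem.List.pyGet? g pos = some c
      · rw [if_pos hdot]
        have hlo0 : 0 ≤ pos - (half : Int) := by omega
        have hlolen : (pos - (half : Int)).toNat < dd.length := by omega
        have hhilen : (min ((pos - (half : Int)) + (bs : Int)) ((size : Int))).toNat <
            (dd.modify (pos - (half : Int)).toNat (· + 1)).length := by
          simp only [List.length_modify]; omega
        rw [ih _ (by simp [hlen]) (fun q hq => hmem q (by simp [hq]))]
        have hsub : (fun z : Int => z - 1) = (fun z : Int => z + (-1)) := by funext z; ring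
        rw [hsub]
        rw [modify_take_sum _ _ _ _ hhilen]
        rw [modify_take_sum _ _ _ _ hlolen]
        have harith :
            (if (pos - (half : Int)).toNat < i + 1 then (1 : Int) else 0) +
              (if (min ((pos - (half : Int)) + (bs : Int)) ((size : Int))).toNat < i + 1 then (-1 : Int) else 0) =
            if pos - (half : Int) ≤ (i : Int) ∧ (i : Int) < pos - (half : Int) + (bs : Int) then 1 else 0 := by
          split_ifs <;> omega
        by_cases hw : pos - (half : Int) ≤ (i : Int) ∧ (i : Int) < pos - (half : Int) + (bs : Int)
        · rw [if_pos hw] at harith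
          have hcond : (decide (PySem.List.pyGet? g pos = some c) &&
              decide (pos - (half : Int) ≤ (i : Int) ∧
                (i : Int) < pos - (half : Int) + (bs : Int))) = true := by
            simp [hdot, hw]
          simp only [hcond, reduceIte, List.length_cons]
          push_cast at harith ⊢
          omega
        · rw [if_neg hw] at harith
          have hcond : (decide (PySem.List.pyGet? g pos = some c) &&
              decide (pos - (half : Int) ≤ (i : Int) ∧
                (i : Int) < pos - (half : Int) + (bs : Int))) = false := by
            rw [decide_eq_false hw, Bool.and_false]
          simp only [hcond]
          push_cast at harith ⊢
          omega
      · rw [if_neg hdot]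
        have hcond : (decide (PySem.List.pyGet? g pos = some c) &&
            decide (pos - (half : Int) ≤ (i : Int) ∧
              (i : Int) < pos - (half : Int) + (bs : Int))) = false := by
          simp [hdot]
        simp only [hcond]
        exact ih _ hlen (fun q hq => hmem q (by simp [hq]))

theorem diff_fold_length (g : List Int) (c : Int) (size bs half : Nat)
    (L : List Int) (dd : List Int) :
    (L.foldl (fun (dd : List Int) (pos : Int) =>
        if PySem.List.pyGet? g pos = some c then
          (dd.modify (pos - (half : Int)).toNat (· + 1)).modify
            (min ((pos - (half : Int)) + (bs : Int)) ((size : Int))).toNat (· - 1)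
        else dd) dd).length = dd.length := by
  induction L generalizing dd with
  | nil => simp
  | cons pos L ih =>
      simp only [List.foldl_cons]
      rw [ih]
      split <;> simp

-- the filtered pyRange of port B finds a dot covering i iff covB's range scan does
theorem range_filter_pos (g : List Int) (c : Int) (bs half i : Nat) (hhb : half ≤ bs) :
    (0 < ((PySem.List.pyRange (bs : Int) (g.length : Int) 1).filter
        (fun (pos : Int) => decide (PySem.List.pyGet? g pos = some c) &&
          decide (pos - (half : Int) ≤ (i : Int) ∧
            (i : Int) < pos - (half : Int) + (bs : Int)))).length) ↔
    ((List.range g.length).any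
      (fun p => decide (bs ≤ p) && decide (g.getD p 0 = c) && winB half bs p i) = true) := by
  rw [List.length_pos_iff, ← List.isEmpty_eq_false_iff, List.isEmpty_eq_false_iff_exists_mem,
    List.any_eq_true]
  constructor
  · rintro ⟨pos, hmem⟩
    rw [List.mem_filter] at hmem
    obtain ⟨hrange, hcond⟩ := hmem
    rw [PySem.List.mem_pyRange_one] at hrange
    simp only [Bool.and_eq_true, decide_eq_true_eq] at hcond
    obtain ⟨hget, hwin⟩ := hcond
    have hpos0 : 0 ≤ pos := by omega
    have hplen : pos.toNat < g.length := by omega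
    refine ⟨pos.toNat, List.mem_range.mpr hplen, ?_⟩
    have hcast : ((pos.toNat : Int)) = pos := by omega
    have hget' : g.getD pos.toNat 0 = c := by
      rw [PySem.List.pyGet?_of_nonneg _ hpos0, List.getElem?_eq_getElem hplen] at hget
      rw [List.getD_eq_getElem g 0 hplen]
      simpa using hget
    simp only [winB, Bool.and_eq_true, decide_eq_true_eq]
    refine ⟨⟨by omega, hget'⟩, ?_⟩
    rw [hcast]
    exact hwin
  · rintro ⟨p, hp, hcond⟩
    have hpn : p < g.length := List.mem_range.mp hp
    simp only [winB, Bool.and_eq_true, decide_eq_true_eq] at hcond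
    obtain ⟨⟨hbp, hgd⟩, hw⟩ := hcond
    refine ⟨(p : Int), ?_⟩
    rw [List.mem_filter, PySem.List.mem_pyRange_one]
    refine ⟨⟨by omega, by omega⟩, ?_⟩
    simp only [Bool.and_eq_true, decide_eq_true_eq]
    refine ⟨?_, ⟨hw.1, hw.2⟩⟩
    rw [PySem.List.pyGet?_natCast, List.getElem?_eq_getElem hpn]
    rw [List.getD_eq_getElem g 0 hpn] at hgd
    simp [hgd]

theorem charB (g : List Int) (c : Int) (t : List Int) (hg : g = c :: t) (hc : c ≠ 0) :
    transform_copy_block_to_dots_alt g = outSpec g c (pyBlockSize g c 1) (pyBlockSize g c 1 / 2) := by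
  have hlen : 1 ≤ g.length := by subst hg; simp
  have hne : ¬ (g = ([] : List Int)) := by subst hg; simp
  have hhead : g.headI = c := by subst hg; simp
  obtain ⟨hbs1, hbs2⟩ := pyBlockSize_bounds g c 1 hlen
  have hhb : pyBlockSize g c 1 / 2 ≤ pyBlockSize g c 1 := Nat.div_le_self _ 2
  unfold transform_copy_block_to_dots_alt
  rw [if_neg hne]
  simp only [hhead]
  rw [if_neg hc]
  set size := g.length with hsizedef
  set bs := pyBlockSize g c 1 with hbsdef
  set half := bs / 2 with hhalfdef
  set d0 : List Int := ((List.replicate (size + 1) (0 : Int)).modify 0 (· + 1)).modify bs (· - 1)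
    with hd0
  have hd0len : d0.length = size + 1 := by simp [hd0]
  set L := PySem.List.pyRange (bs : Int) (size : Int) 1 with hL
  set d := L.foldl (fun (dd : List Int) (pos : Int) =>
    if PySem.List.pyGet? g pos = some c then
      (dd.modify (pos - (half : Int)).toNat (· + 1)).modify
        (min ((pos - (half : Int)) + (bs : Int)) ((size : Int))).toNat (· - 1)
    else dd) d0 with hd
  have hdlen : d.length = size + 1 := by
    rw [hd, diff_fold_length g c size bs half L d0]; exact hd0len
  have htakelen : (d.take size).length = size := by
    rw [List.length_take, hdlen]; omega
  rw [scanCov_eq, htakelen]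
  unfold outSpec
  apply List.map_congr_left
  intro i hi
  have hi' : i < size := List.mem_range.mp hi
  have htt : (d.take size).take (i + 1) = d.take (i + 1) := by
    rw [List.take_take]; congr 1; omega
  rw [htt]
  have hmem : ∀ pos ∈ L, (bs : Int) ≤ pos ∧ pos < (size : Int) := by
    intro pos hp
    rw [hL, PySem.List.mem_pyRange_one] at hp
    exact hp
  have hdsum := diff_fold g c size bs half i L d0 hd0len hmem hhb hi'
  rw [hd, hdsum]
  have hrep : ∀ m : Nat, ((List.replicate (size + 1) (0 : Int)).take m).sum = 0 := by
    intro m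
    rw [List.take_replicate]
    simp
  have h0len : (0 : Nat) < (List.replicate (size + 1) (0 : Int)).length := by simp
  have hbslen : bs < ((List.replicate (size + 1) (0 : Int)).modify 0 (· + 1)).length := by
    simp only [List.length_modify, List.length_replicate]; omega
  have hd0sum : (d0.take (i + 1)).sum = if i < bs then 1 else 0 := by
    rw [hd0]
    have hsub : (fun z : Int => z - 1) = (fun z : Int => z + (-1)) := by funext z; ring
    rw [hsub]
    rw [modify_take_sum _ _ _ _ hbslen]
    rw [modify_take_sum _ _ _ _ h0len]
    rw [hrep]
    split_ifs <;> omega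
  rw [hd0sum]
  have hposiff := range_filter_pos g c bs half i hhb
  rw [← hL, ← hsizedef] at hposiff
  set cnt := (L.filter (fun (pos : Int) => decide (PySem.List.pyGet? g pos = some c) &&
      decide (pos - (half : Int) ≤ (i : Int) ∧
        (i : Int) < pos - (half : Int) + (bs : Int)))).length with hcnt
  by_cases h1 : i < bs
  · have hgt : 0 + ((if i < bs then (1 : Int) else 0) + (cnt : Int)) > 0 := by
      rw [if_pos h1]
      have : (0 : Int) ≤ (cnt : Int) := Int.natCast_nonneg _
      omega
    rw [if_pos hgt]
    have hcov : covB g c bs half i = true := by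
      unfold covB
      rw [decide_eq_true h1, Bool.true_or]
    rw [hcov]
    simp
  · by_cases h2 : (List.range size).any
        (fun p => decide (bs ≤ p) && decide (g.getD p 0 = c) && winB half bs p i) = true
    · have hcp : 0 < cnt := hposiff.mpr h2
      have hgt : 0 + ((if i < bs then (1 : Int) else 0) + (cnt : Int)) > 0 := by
        rw [if_neg h1]
        have : (0 : Int) < (cnt : Int) := by exact_mod_cast hcp
        omega
      rw [if_pos hgt]
      have hcov : covB g c bs half i = true := by
        unfold covB
        rw [← hsizedef, h2, Bool.or_true]
      rw [hcov]
      simp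
    · have hcp : cnt = 0 := by
        by_contra hnz
        exact h2 (hposiff.mp (by omega))
      have hgt : ¬ (0 + ((if i < bs then (1 : Int) else 0) + (cnt : Int)) > 0) := by
        rw [if_neg h1, hcp]
        omega
      rw [if_neg hgt]
      have h2f : ((List.range size).any
          (fun p => decide (bs ≤ p) && decide (g.getD p 0 = c) && winB half bs p i)) = false := by
        simpa using h2
      have hcov : covB g c bs half i = false := by
        unfold covB
        rw [← hsizedef, h2f, Bool.or_false, decide_eq_false h1]
      rw [hcov]
      simp

-- ===== VERDICT (by name: the statement is the Claim_ definition above) =====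
theorem transform_copy_block_to_dots_spec : Claim_equal_transform_copy_block_to_dots := by
  intro g _hD hP
  unfold Spec_transform_copy_block_to_dots
  obtain ⟨hne, hh⟩ := hP
  match hgm : g with
  | [] => exact absurd rfl hne
  | c :: t =>
    have hc : c ≠ 0 := by simpa using hh
    rw [charA (c :: t) c t rfl hc, charB (c :: t) c t rfl hc]
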